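-- pv_equiv track=rewrite | github.com/nitsuah/kryptos | src/kryptos/k4/vigenere_key_recovery.py | _generate_key_combinations
-- ===== SOURCE A (Python) =====
-- def _generate_key_combinations(key_chars: list[list[str]], max_keys: int = 10) -> list[str]:
--     """Generate key combinations from candidate characters at each position.
--
--     Generates combinations in rank-prioritized order: combinations with lower
--     total rank appear first. This ensures that keys like PALIMPSEST (ranks [1,2,1,2,...])
--     appear earlier than lexicographic ordering would place them.
--
--     Args:
--         key_chars: List of candidate characters for each key position
--         max_keys: Maximum number of keys to generate
--
--     Returns:
--         List of candidate keys (up to max_keys)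
--     """
--     if not key_chars:
--         return []
--
--     import heapq
--
--     # Use a priority queue to generate combinations by rank sum
--     # Entry format: (rank_sum, combination_indices)
--     # Start with all rank-0 (first candidate at each position)
--     initial = tuple(0 for _ in key_chars)
--     initial_sum = sum(initial)
--
--     heap = [(initial_sum, initial)]
--     seen = {initial}
--     result = []
--
--     while heap and len(result) < max_keys:
--         _, indices = heapq.heappop(heap)
--
--         # Convert indices to actual key
--         try:
--             key = ''.join(key_chars[i][idx] for i, idx in enumerate(indices))
--             result.append(key)
--         except IndexError:
--             continue
--
--         # Generate neighbors: increment each position's index by 1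
--         for pos in range(len(indices)):
--             if indices[pos] + 1 < len(key_chars[pos]):
--                 neighbor = list(indices)
--                 neighbor[pos] += 1
--                 neighbor_tuple = tuple(neighbor)
--
--                 if neighbor_tuple not in seen:
--                     seen.add(neighbor_tuple)
--                     neighbor_sum = sum(neighbor_tuple)
--                     heapq.heappush(heap, (neighbor_sum, neighbor_tuple))
--
--     return result
-- ===== SOURCE B (Python) =====
-- def _tuples_with_sum(key_chars, pos, s):
--     """All index tuples for positions pos.. with rank sum s, in lexicographic order."""
--     if pos == len(key_chars):
--         return [[]] if s == 0 else []
--     out = []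
--     for i in range(min(len(key_chars[pos]), s + 1)):
--         for t in _tuples_with_sum(key_chars, pos + 1, s - i):
--             out.append([i] + t)
--     return out
--
--
-- def _generate_key_combinations(key_chars: list[list[str]], max_keys: int = 10) -> list[str]:
--     """Generate key combinations in rank-sum order, layer by layer (no heap)."""
--     if not key_chars:
--         return []
--     result = []
--     cap = sum(len(c) - 1 for c in key_chars)
--     s = 0
--     while len(result) < max_keys and s <= cap:
--         for t in _tuples_with_sum(key_chars, 0, s):
--             if len(result) >= max_keys:
--                 break
--             result.append(''.join(key_chars[i][j] for i, j in enumerate(t)))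
--         s += 1
--     return result
-- ===== Notes on version B (the rewrite author's own statement) =====
-- stated objective: alternative
-- what changed: Replaces the best-first heap expansion with its dedup 'seen' set by a layered enumeration: for each rank sum s = 0, 1, 2, ... it generates all index tuples with that sum directly in lexicographic order by structural recursion over the positions, so the priority queue, the seen-set and the neighbour generation disappear.
import Mathlib
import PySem

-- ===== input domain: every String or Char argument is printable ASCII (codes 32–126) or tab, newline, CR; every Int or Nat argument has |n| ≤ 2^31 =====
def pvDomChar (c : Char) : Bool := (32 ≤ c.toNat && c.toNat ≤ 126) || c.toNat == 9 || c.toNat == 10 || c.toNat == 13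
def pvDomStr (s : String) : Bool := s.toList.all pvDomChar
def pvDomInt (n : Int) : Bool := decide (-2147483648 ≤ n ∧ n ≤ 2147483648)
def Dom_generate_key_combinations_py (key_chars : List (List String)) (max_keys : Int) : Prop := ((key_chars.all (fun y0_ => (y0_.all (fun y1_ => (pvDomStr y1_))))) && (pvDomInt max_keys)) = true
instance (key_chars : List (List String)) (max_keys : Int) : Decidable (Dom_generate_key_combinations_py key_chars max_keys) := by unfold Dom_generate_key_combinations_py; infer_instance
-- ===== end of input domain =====

-- B replaces A's best-first heap expansion (with dedup set) by a direct layer-by-layer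
-- enumeration of index tuples by rank sum; objective: alternative algorithm, same values.


-- ===== PORT A =====
-- Python's tuple-of-int '<' (lexicographic), used by heapq to compare (rank_sum, indices) entries.
def pvLexLt : List Nat → List Nat → Bool
  | [], [] => false
  | [], _ :: _ => true
  | _ :: _, [] => false
  | a :: as, b :: bs => decide (a < b) || (a == b && pvLexLt as bs)

def pvEntryLt (a b : Nat × List Nat) : Bool :=
  decide (a.1 < b.1) || (a.1 == b.1 && pvLexLt a.2 b.2)

-- heapq.heappop returns the minimum entry of the heap (entries here are pairwise distinct).
def pvHeapMin (x : Nat × List Nat) (xs : List (Nat × List Nat)) : Nat × List Nat :=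
  xs.foldl (fun m y => if pvEntryLt y m then y else m) x

-- ''.join(key_chars[i][idx] for i, idx in enumerate(indices)); none = IndexError.
def pvJoinKey? (key_chars : List (List String)) (t : List Nat) : Option String :=
  ((PySem.List.enumerate t).mapM (fun p =>
      (PySem.List.pyGet? key_chars p.1).bind (fun row => PySem.List.pyGet? row (p.2 : Int)))).map
    (fun parts => PySem.Str.join "" parts)

-- one step of the neighbour-generation 'for pos in range(len(indices))' loop body
def pvPush (key_chars : List (List String)) (indices : List Nat)
    (st : List (Nat × List Nat) × PySem.Set (List Nat)) (pos : Nat) :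
    List (Nat × List Nat) × PySem.Set (List Nat) :=
  if indices.getD pos 0 + 1 < (key_chars.getD pos []).length then
    let nb := indices.set pos (indices.getD pos 0 + 1)
    if nb ∈ st.2 then st
    else ((nb.sum, nb) :: st.1, PySem.Set.add st.2 nb)
  else st

-- the 'while heap and len(result) < max_keys' loop; the fuel passed by the wrapper
-- ((product of the candidate-list lengths) + 1) bounds the number of pops, since each
-- distinct index tuple is pushed at most once (guarded by 'seen').
def pvALoop (key_chars : List (List String)) (max_keys : Int) :
    Nat → List (Nat × List Nat) → PySem.Set (List Nat) → List String → List String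
  | 0, _, _, result => result
  | fuel + 1, heap, seen, result =>
    match heap with
    | [] => result
    | x :: xs =>
      if (result.length : Int) < max_keys then
        let m := pvHeapMin x xs
        let heap' := (x :: xs).erase m
        match pvJoinKey? key_chars m.2 with
        | none => pvALoop key_chars max_keys fuel heap' seen result
        | some key =>
          let st := (List.range m.2.length).foldl (pvPush key_chars m.2) (heap', seen)
          pvALoop key_chars max_keys fuel st.1 st.2 (result ++ [key])
      else result

def generate_key_combinations_py (key_chars : List (List String)) (max_keys : Int) : List String :=
  if key_chars = [] then []
  else
    let initial : List Nat := key_chars.map (fun _ => 0)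
    pvALoop key_chars max_keys ((key_chars.map (fun c => c.length)).prod + 1)
      [(initial.sum, initial)] (PySem.Set.ofList [initial]) []

-- ===== PORT B =====
-- _tuples_with_sum(key_chars, pos, s): all index tuples for the remaining positions with
-- rank sum s, in lexicographic order (structural recursion on the suffix of key_chars).
def pvWithSum : List (List String) → Nat → List (List Nat)
  | [], s => if s = 0 then [[]] else []
  | c :: rest, s =>
    (List.range (min c.length (s + 1))).flatMap
      (fun i => (pvWithSum rest (s - i)).map (fun t => i :: t))

-- ''.join(key_chars[i][j] for i, j in enumerate(t)); every index produced by pvWithSum is in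
-- range, so the total getD lookup computes exactly what the Python join computes.
def pvJoinKey (key_chars : List (List String)) (t : List Nat) : String :=
  PySem.Str.join "" ((PySem.List.enumerate t).map (fun p =>
    (key_chars.getD p.1.toNat []).getD p.2 ""))

-- the inner 'for t in _tuples_with_sum(...)' loop with its 'if len(result) >= max_keys: break'
def pvBInner (key_chars : List (List String)) (max_keys : Int)
    (result : List String) (ts : List (List Nat)) : List String :=
  ts.foldl (fun r t => if (r.length : Int) < max_keys then r ++ [pvJoinKey key_chars t] else r)
    result

-- the outer 'while len(result) < max_keys and s <= cap' loop; the countdown (cap+1-s) is the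
-- loop variable 's' counted from the other end.
def pvBLoop (key_chars : List (List String)) (max_keys : Int) :
    Nat → Nat → List String → List String
  | 0, _, result => result
  | k + 1, s, result =>
    if (result.length : Int) < max_keys then
      pvBLoop key_chars max_keys k (s + 1)
        (pvBInner key_chars max_keys result (pvWithSum key_chars s))
    else result

def generate_key_combinations_py_alt (key_chars : List (List String)) (max_keys : Int) :
    List String :=
  if key_chars = [] then []
  else
    let cap : Int := (key_chars.map (fun c => (c.length : Int) - 1)).sum
    pvBLoop key_chars max_keys (cap + 1).toNat 0 []

-- ===== PRECONDITION & SPEC =====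
def Spec_generate_key_combinations_py (key_chars : List (List String)) (max_keys : Int) (out : List String) : Prop := out = generate_key_combinations_py_alt key_chars max_keys
instance (key_chars : List (List String)) (max_keys : Int) (out : List String) : Decidable (Spec_generate_key_combinations_py key_chars max_keys out) := by unfold Spec_generate_key_combinations_py; infer_instance

-- ===== CLAIM (what is proved, stated in full; the proofs are below) =====
def Claim_equal_generate_key_combinations_py : Prop := ∀ (key_chars : List (List String)) (max_keys : Int), Dom_generate_key_combinations_py key_chars max_keys → Spec_generate_key_combinations_py key_chars max_keys (generate_key_combinations_py key_chars max_keys)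

-- ===== LEMMAS AND PROOFS =====

-- `valid kc t`: t is an index tuple admissible for kc (one in-range index per position).
def pvValid (kc : List (List String)) (t : List Nat) : Prop :=
  t.length = kc.length ∧ ∀ i < kc.length, t.getD i 0 < (kc.getD i []).length

-- strict "(rank sum, tuple)" order (the heap order) as a Bool
def pvKltB (t u : List Nat) : Bool :=
  decide (t.sum < u.sum) || (t.sum == u.sum && pvLexLt t u)

def pvCapN (kc : List (List String)) : Nat := (kc.map (fun c => c.length - 1)).sum

-- the reference enumeration: all admissible tuples, layered by rank sum, lex within a layer
def pvLL (kc : List (List String)) : List (List Nat) :=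
  (List.range (pvCapN kc + 1)).flatMap (pvWithSum kc)

theorem pvValid_cons (c : List String) (rest : List (List String)) (i : Nat) (t : List Nat) :
    pvValid (c :: rest) (i :: t) ↔ i < c.length ∧ pvValid rest t := by
  constructor
  · rintro ⟨hl, hb⟩
    refine ⟨by simpa using hb 0 (by simp), by simpa using hl, fun j hj => ?_⟩
    simpa using hb (j + 1) (by simpa using hj)
  · rintro ⟨hi, hl, hb⟩
    refine ⟨by simpa using hl, fun j hj => ?_⟩
    cases j with
    | zero => simpa using hi
    | succ j => simpa using hb j (by simpa using hj)

theorem pvMem_withSum (kc : List (List String)) (s : Nat) (t : List Nat) :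
    t ∈ pvWithSum kc s ↔ pvValid kc t ∧ t.sum = s := by
  induction kc generalizing s t with
  | nil =>
    by_cases hs : s = 0 <;> cases t <;>
      simp [pvWithSum, pvValid, hs, eq_comm]
  | cons c rest ih =>
    constructor
    · intro h
      simp only [pvWithSum, List.mem_flatMap, List.mem_range, List.mem_map] at h
      obtain ⟨i, hi, t', ht', rfl⟩ := h
      rw [ih] at ht'
      obtain ⟨hv, hsum⟩ := ht'
      rw [Nat.lt_min] at hi
      refine ⟨(pvValid_cons c rest i t').mpr ⟨hi.1, hv⟩, ?_⟩
      simp only [List.sum_cons]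
      omega
    · rintro ⟨hv, hsum⟩
      cases t with
      | nil => exact absurd hv.1 (by simp)
      | cons i t' =>
        obtain ⟨hi, hv'⟩ := (pvValid_cons c rest i t').mp hv
        simp only [List.sum_cons] at hsum
        simp only [pvWithSum, List.mem_flatMap, List.mem_range, List.mem_map]
        exact ⟨i, by omega, t', (ih (s - i) t').mpr ⟨hv', by omega⟩, rfl⟩

theorem pvLexLt_irrefl (t : List Nat) : pvLexLt t t = false := by
  induction t with
  | nil => rfl
  | cons a as ih => simp [pvLexLt, ih]

theorem pvLexLt_asymm (t u : List Nat) (h : pvLexLt t u = true) : pvLexLt u t = false := by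
  induction t generalizing u with
  | nil =>
    cases u with
    | nil => simp [pvLexLt] at h
    | cons b bs => simp [pvLexLt]
  | cons a as ih =>
    cases u with
    | nil => simp [pvLexLt] at h
    | cons b bs =>
      simp only [pvLexLt, Bool.or_eq_true, decide_eq_true_eq, Bool.and_eq_true,
        beq_iff_eq] at h
      rcases h with h | ⟨heq, hrec⟩
      · have h1 : ¬ (b < a) := by omega
        have h2 : (b == a) = false := by simp; omega
        simp [pvLexLt, h1, h2]
      · subst heq
        have h3 := ih bs hrec
        simp [pvLexLt, h3]

theorem pvKltB_irrefl (t : List Nat) : pvKltB t t = false := by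
  simp [pvKltB, pvLexLt_irrefl]

theorem pvKltB_asymm (t u : List Nat) (h : pvKltB t u = true) : pvKltB u t = false := by
  simp only [pvKltB, Bool.or_eq_true, decide_eq_true_eq, Bool.and_eq_true, beq_iff_eq] at h
  rcases h with h | ⟨he, hl⟩
  · have h1 : ¬ (u.sum < t.sum) := by omega
    have h2 : (u.sum == t.sum) = false := by simp; omega
    simp [pvKltB, h1, h2]
  · have h1 : ¬ (u.sum < t.sum) := by omega
    have h2 : pvLexLt u t = false := pvLexLt_asymm t u hl
    simp [pvKltB, h1, h2]

theorem pvLexLt_cons_same (i : Nat) (a b : List Nat) :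
    pvLexLt (i :: a) (i :: b) = pvLexLt a b := by
  simp [pvLexLt]

theorem pvPairwise_flatMap {α β : Type} (R : α → α → Prop) (S : β → β → Prop)
    (f : β → List α) (l : List β) (hl : l.Pairwise S)
    (hf : ∀ b ∈ l, (f b).Pairwise R)
    (hS : ∀ b₁ ∈ l, ∀ b₂ ∈ l, S b₁ b₂ → ∀ a₁ ∈ f b₁, ∀ a₂ ∈ f b₂, R a₁ a₂) :
    (l.flatMap f).Pairwise R := by
  induction l with
  | nil => simp
  | cons b bs ih =>
    obtain ⟨hb, htl⟩ := List.pairwise_cons.mp hl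
    simp only [List.flatMap_cons]
    rw [List.pairwise_append]
    refine ⟨hf b (by simp), ih htl (fun b' hb' => hf b' (by simp [hb']))
      (fun b₁ h₁ b₂ h₂ hs => hS b₁ (by simp [h₁]) b₂ (by simp [h₂]) hs), ?_⟩
    intro a₁ h₁ a₂ h₂
    simp only [List.mem_flatMap] at h₂
    obtain ⟨b₂, hb₂, ha₂⟩ := h₂
    exact hS b (by simp) b₂ (by simp [hb₂]) (hb b₂ hb₂) a₁ h₁ a₂ ha₂

theorem pvPairwise_withSum (kc : List (List String)) (s : Nat) :
    (pvWithSum kc s).Pairwise (fun a b => pvLexLt a b = true) := by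
  induction kc generalizing s with
  | nil => by_cases hs : s = 0 <;> simp [pvWithSum, hs]
  | cons c rest ih =>
    simp only [pvWithSum]
    refine pvPairwise_flatMap _ (· < ·) _ _ (List.pairwise_lt_range) ?_ ?_
    · intro i _
      rw [List.pairwise_map]
      exact (ih (s - i)).imp (fun h => by simpa [pvLexLt_cons_same] using h)
    · intro i₁ _ i₂ _ hlt a₁ ha₁ a₂ ha₂
      simp only [List.mem_map] at ha₁ ha₂
      obtain ⟨t₁, _, rfl⟩ := ha₁
      obtain ⟨t₂, _, rfl⟩ := ha₂
      simp [pvLexLt, hlt]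

theorem pvSum_le_capN (kc : List (List String)) (t : List Nat) (h : pvValid kc t) :
    t.sum ≤ pvCapN kc := by
  induction kc generalizing t with
  | nil =>
    have : t = [] := List.eq_nil_of_length_eq_zero (by simpa using h.1)
    subst this
    simp [pvCapN]
  | cons c rest ih =>
    cases t with
    | nil => exact absurd h.1 (by simp)
    | cons i t' =>
      obtain ⟨hi, hv⟩ := (pvValid_cons c rest i t').mp h
      have := ih t' hv
      simp only [pvCapN, List.map_cons, List.sum_cons] at this ⊢
      omega

theorem pvMem_LL (kc : List (List String)) (t : List Nat) :
    t ∈ pvLL kc ↔ pvValid kc t := by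
  simp only [pvLL, List.mem_flatMap, List.mem_range]
  constructor
  · rintro ⟨s, _, ht⟩
    exact ((pvMem_withSum kc s t).mp ht).1
  · intro h
    exact ⟨t.sum, by have := pvSum_le_capN kc t h; omega,
      (pvMem_withSum kc t.sum t).mpr ⟨h, rfl⟩⟩

theorem pvPairwise_LL (kc : List (List String)) :
    (pvLL kc).Pairwise (fun a b => pvKltB a b = true) := by
  refine pvPairwise_flatMap _ (· < ·) _ _ (List.pairwise_lt_range) ?_ ?_
  · intro s _
    refine (List.Pairwise.and_mem.mp (pvPairwise_withSum kc s)).imp ?_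
    rintro a b ⟨ha, hb, hlex⟩
    have hsa : a.sum = s := ((pvMem_withSum kc s a).mp ha).2
    have hsb : b.sum = s := ((pvMem_withSum kc s b).mp hb).2
    simp [pvKltB, hsa, hsb, hlex]
  · intro s₁ _ s₂ _ hlt a₁ ha₁ a₂ ha₂
    have h1 : a₁.sum = s₁ := ((pvMem_withSum kc s₁ a₁).mp ha₁).2
    have h2 : a₂.sum = s₂ := ((pvMem_withSum kc s₂ a₂).mp ha₂).2
    simp [pvKltB, h1, h2, hlt]

theorem pvNodup_LL (kc : List (List String)) : (pvLL kc).Nodup := by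
  refine (pvPairwise_LL kc).imp ?_
  intro a b h hab
  subst hab
  rw [pvKltB_irrefl] at h
  exact Bool.false_ne_true h

-- the full (unlayered) lexicographic product, used only to bound the tuple count
def pvPfull (kc : List (List String)) : List (List Nat) :=
  kc.foldr (fun c acc => (List.range c.length).flatMap (fun i => acc.map (i :: ·))) [[]]

theorem pvMapM_some {α β : Type} (F : α → Option β) (f : α → β) (l : List α)
    (h : ∀ p ∈ l, F p = some (f p)) : l.mapM F = some (l.map f) := by
  induction l with
  | nil => rfl
  | cons x xs ih =>
    have hx := h x (by simp)
    have hxs := ih (fun p hp => h p (by simp [hp]))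
    simp [List.mapM_cons, hx, hxs]

theorem pvMapM_none {α β : Type} (F : α → Option β) (l : List α) (p : α) (hp : p ∈ l)
    (h : F p = none) : l.mapM F = none := by
  induction l with
  | nil => simp at hp
  | cons x xs ih =>
    rcases List.mem_cons.mp hp with rfl | hp'
    · simp [List.mapM_cons, h]
    · cases hFx : F x with
      | none => simp [List.mapM_cons, hFx]
      | some v => simp [List.mapM_cons, hFx, ih hp']

theorem pvJoinKey?_eq (kc : List (List String)) (t : List Nat) (h : pvValid kc t) :
    pvJoinKey? kc t = some (pvJoinKey kc t) := by
  unfold pvJoinKey? pvJoinKey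
  rw [pvMapM_some _ (fun p => (kc.getD p.1.toNat []).getD p.2 "") _ ?_]
  · rfl
  · intro p hp
    rw [PySem.List.mem_enumerate_iff] at hp
    obtain ⟨k, hk, rfl⟩ := hp
    have hk' : k < kc.length := h.1 ▸ hk
    have hb : t.getD k 0 < (kc.getD k []).length := h.2 k hk'
    rw [List.getD_eq_getElem t 0 hk] at hb
    rw [List.getD_eq_getElem kc [] hk'] at hb
    simp only [zero_add, Int.toNat_natCast, PySem.List.pyGet?_natCast]
    rw [List.getElem?_eq_getElem hk']
    simp only [Option.bind_some]
    rw [List.getElem?_eq_getElem hb]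
    rw [List.getD_eq_getElem kc [] hk', List.getD_eq_getElem _ _ hb]

theorem pvJoinKey?_initial_none (kc : List (List String)) (i : Nat) (hi : i < kc.length)
    (he : kc[i] = ([] : List String)) :
    pvJoinKey? kc (kc.map (fun _ => 0)) = none := by
  unfold pvJoinKey?
  rw [pvMapM_none _ _ (((0:Int) + i, (kc.map (fun _ => (0:Nat)))[i]'(by simpa using hi))) ?_ ?_]
  · rfl
  · rw [PySem.List.mem_enumerate_iff]
    exact ⟨i, by simpa using hi, rfl⟩
  · simp only [List.getElem_map, zero_add, PySem.List.pyGet?_natCast]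
    rw [List.getElem?_eq_getElem hi, he]
    simp

theorem pvEntryLt_irrefl (a : Nat × List Nat) : pvEntryLt a a = false := by
  simp [pvEntryLt, pvLexLt_irrefl]

theorem pvEntryLt_eq_kltB (t u : List Nat) :
    pvEntryLt (t.sum, t) (u.sum, u) = pvKltB t u := rfl

theorem pvHeapMin_eq (xs : List (Nat × List Nat)) (m : Nat × List Nat) :
    ∀ x : Nat × List Nat, m ∈ x :: xs →
      (∀ y ∈ x :: xs, y ≠ m → pvEntryLt y m = false ∧ pvEntryLt m y = true) →
      pvHeapMin x xs = m := by
  induction xs with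
  | nil =>
    intro x hm _
    rw [List.mem_singleton] at hm
    simp [pvHeapMin, hm]
  | cons y ys ih =>
    intro x hm hmin
    have hstep : pvHeapMin x (y :: ys) = pvHeapMin (if pvEntryLt y x then y else x) ys := rfl
    rw [hstep]
    refine ih _ ?_ ?_
    · rcases List.mem_cons.mp hm with hmx | hm'
      · by_cases hyx : pvEntryLt y x = true
        · exfalso
          by_cases hy : y = m
          · rw [hy, hmx, pvEntryLt_irrefl] at hyx
            exact Bool.false_ne_true hyx
          · have h1 := (hmin y (by simp) hy).1
            rw [← hmx] at hyx
            rw [h1] at hyx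
            exact Bool.false_ne_true hyx
        · rw [if_neg hyx, hmx]
          exact List.mem_cons_self ..
      · rcases List.mem_cons.mp hm' with hmy | hm''
        · by_cases hyx : pvEntryLt y x = true
          · rw [if_pos hyx, hmy]
            exact List.mem_cons_self ..
          · by_cases hxm : x = m
            · rw [if_neg hyx, hxm]
              exact List.mem_cons_self ..
            · exfalso
              have h2 := (hmin x (by simp) hxm).2
              rw [hmy] at h2
              exact hyx h2
        · exact List.mem_cons_of_mem _ hm''
    · intro z hz hzm
      rcases List.mem_cons.mp hz with rfl | hz'
      · by_cases hyx : pvEntryLt y x = true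
        · rw [if_pos hyx] at hzm ⊢
          exact hmin y (by simp) hzm
        · rw [if_neg hyx] at hzm ⊢
          exact hmin x (by simp) hzm
      · exact hmin z (by simp [hz']) hzm

theorem pvGetD_set_self (t : List Nat) (pos : Nat) (x : Nat) (h : pos < t.length) :
    (t.set pos x).getD pos 0 = x := by
  rw [List.getD_eq_getElem _ _ (by simpa using h)]
  simp

theorem pvSet_set_self (t : List Nat) (pos : Nat) (x : Nat) (h : pos < t.length) :
    (t.set pos x).set pos (t.getD pos 0) = t := by
  rw [List.set_set]
  apply List.ext_getElem (by simp)
  intro i h1 h2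
  rw [List.getElem_set]
  split
  · next heq => subst heq; rw [List.getD_eq_getElem _ _ h]
  · rfl

theorem pvValid_set (kc : List (List String)) (t : List Nat) (pos x : Nat)
    (h : pvValid kc t) (hp : pos < t.length) (hx : x < (kc.getD pos []).length) :
    pvValid kc (t.set pos x) := by
  refine ⟨by simpa using h.1, fun i hi => ?_⟩
  by_cases hip : pos = i
  · subst hip
    rw [pvGetD_set_self t pos x hp]
    exact hx
  · have : (t.set pos x).getD i 0 = t.getD i 0 := by
      by_cases hit : i < t.length
      · rw [List.getD_eq_getElem _ _ (by simpa using hit), List.getD_eq_getElem _ _ hit]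
        simp [hip]
      · rw [List.getD_eq_default _ _ (by simpa using Nat.le_of_not_lt hit),
          List.getD_eq_default _ _ (Nat.le_of_not_lt hit)]
    rw [this]
    exact h.2 i hi

theorem pvSum_set (t : List Nat) (pos : Nat) (x : Nat) (h : pos < t.length) :
    (t.set pos x).sum + t.getD pos 0 = t.sum + x := by
  induction t generalizing pos with
  | nil => simp at h
  | cons a as ih =>
    cases pos with
    | zero => simp [List.set]; omega
    | succ pos =>
      have := ih pos (by simpa using h)
      simp only [List.set, List.sum_cons, List.getD_cons_succ]
      omega

theorem pvExists_pos_of_ne_initial (kc : List (List String)) (t : List Nat)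
    (h : pvValid kc t) (hne : t ≠ kc.map (fun _ => 0)) :
    ∃ pos, pos < t.length ∧ 0 < t.getD pos 0 := by
  by_contra hc
  push Not at hc
  apply hne
  apply List.ext_getElem (by simp [h.1])
  intro i h1 h2
  have := hc i h1
  rw [List.getD_eq_getElem _ _ h1] at this
  simp only [List.getElem_map]
  omega

theorem pvMem_take_of_getElem {α : Type} (l : List α) (r j : Nat) (hj : j < l.length)
    (hjr : j < r) : l[j] ∈ l.take r := by
  have hjt : j < (l.take r).length := by simp; omega
  have : (l.take r)[j] = l[j] := List.getElem_take
  exact this ▸ List.getElem_mem hjt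

theorem pvNotMem_take_getElem {α : Type} (l : List α) (hnd : l.Nodup) (r : Nat)
    (hr : r < l.length) : l[r] ∉ l.take r := by
  intro h
  obtain ⟨j, hj, hje⟩ := List.mem_iff_getElem.mp h
  have hjl : j < l.length := by simp at hj; omega
  have hjr : j < r := by simp at hj; omega
  rw [List.getElem_take] at hje
  have := (List.Nodup.getElem_inj_iff hnd).mp hje
  omega

theorem pvLt_index (kc : List (List String)) (a : List Nat) (ha : a ∈ pvLL kc) (r : Nat)
    (hr : r < (pvLL kc).length) (hab : pvKltB a ((pvLL kc)[r]) = true) :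
    a ∈ (pvLL kc).take r := by
  obtain ⟨j, hj, rfl⟩ := List.mem_iff_getElem.mp ha
  rcases lt_trichotomy j r with hlt | rfl | hgt
  · exact pvMem_take_of_getElem _ r j hj hlt
  · rw [pvKltB_irrefl] at hab
    exact absurd hab (Bool.false_ne_true)
  · have := (List.pairwise_iff_getElem.mp (pvPairwise_LL kc)) r j hr hj hgt
    rw [pvKltB_asymm _ _ this] at hab
    exact absurd hab (Bool.false_ne_true)

theorem pvPfull_length (kc : List (List String)) :
    (pvPfull kc).length = (kc.map (fun c => c.length)).prod := by
  induction kc with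
  | nil => rfl
  | cons c rest ih =>
    simp only [pvPfull, List.foldr_cons, List.length_flatMap, List.map_cons, List.prod_cons]
    have : ∀ (n m : Nat), ((List.range n).map (fun _ => m)).sum = n * m := by
      intro n m
      rw [List.map_const']
      simp [List.sum_replicate, smul_eq_mul]
    calc ((List.range c.length).map
            (fun i => ((pvPfull rest).map (i :: ·)).length)).sum
        = ((List.range c.length).map (fun _ => (pvPfull rest).length)).sum := by
          simp [List.length_map]
      _ = c.length * (pvPfull rest).length := this _ _
      _ = c.length * (rest.map (fun c => c.length)).prod := by rw [ih]

theorem pvMem_Pfull (kc : List (List String)) (t : List Nat) :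
    t ∈ pvPfull kc ↔ pvValid kc t := by
  induction kc generalizing t with
  | nil =>
    cases t <;> simp [pvPfull, pvValid]
  | cons c rest ih =>
    constructor
    · intro h
      simp only [pvPfull, List.foldr_cons, List.mem_flatMap, List.mem_range,
        List.mem_map] at h
      obtain ⟨i, hi, t', ht', rfl⟩ := h
      exact (pvValid_cons c rest i t').mpr ⟨hi, (ih t').mp (by simpa [pvPfull] using ht')⟩
    · intro hv
      cases t with
      | nil => exact absurd hv.1 (by simp)
      | cons i t' =>
        obtain ⟨hi, hv'⟩ := (pvValid_cons c rest i t').mp hv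
        simp only [pvPfull, List.foldr_cons, List.mem_flatMap, List.mem_range, List.mem_map]
        exact ⟨i, hi, t', by simpa [pvPfull] using (ih t').mpr hv', rfl⟩

theorem pvLL_length_le (kc : List (List String)) :
    (pvLL kc).length ≤ (kc.map (fun c => c.length)).prod := by
  rw [← pvPfull_length]
  exact List.Subperm.length_le
    (List.subperm_of_subset (pvNodup_LL kc)
      (fun t ht => (pvMem_Pfull kc t).mpr ((pvMem_LL kc t).mp ht)))

-- the loop invariant of A's while-loop after r keys have been emitted
structure PvInv (kc : List (List String)) (mkN r : Nat)
    (heap : List (Nat × List Nat)) (seen : List (List Nat)) (res : List String) : Prop where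
  hr : r ≤ (pvLL kc).length
  hrm : r ≤ mkN
  hres : res = ((pvLL kc).take r).map (pvJoinKey kc)
  hnd : (heap.map Prod.snd).Nodup
  hheap : ∀ e ∈ heap, e.1 = e.2.sum ∧ e.2 ∈ pvLL kc ∧ e.2 ∉ (pvLL kc).take r
  hseen : ∀ u, u ∈ seen ↔ u ∈ (pvLL kc).take r ∨ u ∈ heap.map Prod.snd
  hinit : (kc.map (fun _ => 0)) ∈ seen
  hclose : ∀ u ∈ (pvLL kc).take r, ∀ pos, pos < u.length →
    u.getD pos 0 + 1 < (kc.getD pos []).length → u.set pos (u.getD pos 0 + 1) ∈ seen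

theorem pvHeapMember (kc : List (List String)) (mkN r : Nat)
    (heap : List (Nat × List Nat)) (seen : List (List Nat)) (res : List String)
    (inv : PvInv kc mkN r heap seen res) (hrN : r < (pvLL kc).length) :
    ((pvLL kc)[r].sum, (pvLL kc)[r]) ∈ heap ∧
      ∀ e ∈ heap, e ≠ ((pvLL kc)[r].sum, (pvLL kc)[r]) →
        pvEntryLt e ((pvLL kc)[r].sum, (pvLL kc)[r]) = false ∧
        pvEntryLt ((pvLL kc)[r].sum, (pvLL kc)[r]) e = true := by
  set t := (pvLL kc)[r] with ht
  have htmem : t ∈ pvLL kc := List.getElem_mem hrN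
  have htv : pvValid kc t := (pvMem_LL kc t).mp htmem
  have hts : t ∈ seen := by
    by_cases hini : t = kc.map (fun _ => 0)
    · rw [hini]; exact inv.hinit
    · obtain ⟨pos, hpos, hv⟩ := pvExists_pos_of_ne_initial kc t htv hini
      have hposk : pos < kc.length := htv.1 ▸ hpos
      have hbound : t.getD pos 0 < (kc.getD pos []).length := htv.2 pos hposk
      have hpv : pvValid kc (t.set pos (t.getD pos 0 - 1)) :=
        pvValid_set kc t pos _ htv hpos (by omega)
      have hsum := pvSum_set t pos (t.getD pos 0 - 1) hpos
      have hklt : pvKltB (t.set pos (t.getD pos 0 - 1)) t = true := by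
        have hlt : (t.set pos (t.getD pos 0 - 1)).sum < t.sum := by omega
        simp only [pvKltB, Bool.or_eq_true, decide_eq_true_eq]
        exact Or.inl hlt
      have hpmem : (t.set pos (t.getD pos 0 - 1)) ∈ (pvLL kc).take r :=
        pvLt_index kc _ ((pvMem_LL kc _).mpr hpv) r hrN hklt
      have hget : (t.set pos (t.getD pos 0 - 1)).getD pos 0 = t.getD pos 0 - 1 :=
        pvGetD_set_self t pos _ hpos
      have hlen : pos < (t.set pos (t.getD pos 0 - 1)).length := by simpa using hpos
      have hcb : (t.set pos (t.getD pos 0 - 1)).getD pos 0 + 1 < (kc.getD pos []).length := by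
        rw [hget]; omega
      have hcl := inv.hclose _ hpmem pos hlen hcb
      rw [hget] at hcl
      have heq : (t.set pos (t.getD pos 0 - 1)).set pos (t.getD pos 0 - 1 + 1) = t := by
        have h1 : t.getD pos 0 - 1 + 1 = t.getD pos 0 := by omega
        rw [h1]
        exact pvSet_set_self t pos _ hpos
      rw [heq] at hcl
      exact hcl
  have htnot : t ∉ (pvLL kc).take r := pvNotMem_take_getElem _ (pvNodup_LL kc) r hrN
  have htheap : t ∈ heap.map Prod.snd := by
    rcases (inv.hseen t).mp hts with h | h
    · exact absurd h htnot
    · exact h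
  obtain ⟨e, he, hesnd⟩ := List.mem_map.mp htheap
  have he1 : e.1 = t.sum := by rw [(inv.hheap e he).1, hesnd]
  have hee : e = (t.sum, t) := Prod.ext he1 hesnd
  constructor
  · rw [← hee]; exact he
  · rintro ⟨s', u'⟩ he' hne
    obtain ⟨h1, h2, h3⟩ := inv.hheap _ he'
    simp only at h1 h2 h3
    subst h1
    have hsne : u' ≠ t := by
      intro hcontra
      exact hne (by rw [hcontra])
    have hk : pvKltB t u' = true := by
      obtain ⟨j, hj, hje⟩ := List.mem_iff_getElem.mp h2
      rcases lt_trichotomy j r with hlt | heqj | hgt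
      · exact absurd (hje ▸ pvMem_take_of_getElem _ r j hj hlt) h3
      · subst heqj
        exact absurd hje.symm hsne
      · have hp := (List.pairwise_iff_getElem.mp (pvPairwise_LL kc)) r j hrN hj hgt
        rw [hje] at hp
        exact hp
    exact ⟨by rw [pvEntryLt_eq_kltB]; exact pvKltB_asymm _ _ hk,
      by rw [pvEntryLt_eq_kltB]; exact hk⟩

-- invariant of the neighbour-generation fold, after the first k positions were processed
structure PvMid (kc : List (List String)) (r : Nat) (t : List Nat) (k : Nat)
    (heap : List (Nat × List Nat)) (seen : List (List Nat)) : Prop where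
  hnd : (heap.map Prod.snd).Nodup
  hheap : ∀ e ∈ heap, e.1 = e.2.sum ∧ e.2 ∈ pvLL kc ∧ e.2 ∉ (pvLL kc).take (r + 1)
  hseen : ∀ u, u ∈ seen ↔ u ∈ (pvLL kc).take (r + 1) ∨ u ∈ heap.map Prod.snd
  hinit : (kc.map (fun _ => 0)) ∈ seen
  hcloseOld : ∀ u ∈ (pvLL kc).take r, ∀ pos, pos < u.length →
    u.getD pos 0 + 1 < (kc.getD pos []).length → u.set pos (u.getD pos 0 + 1) ∈ seen
  hcloseNew : ∀ pos, pos < k → pos < t.length →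
    t.getD pos 0 + 1 < (kc.getD pos []).length → t.set pos (t.getD pos 0 + 1) ∈ seen

theorem pvTake_succ_eq (kc : List (List String)) (r : Nat) (hrN : r < (pvLL kc).length) :
    (pvLL kc).take (r + 1) = (pvLL kc).take r ++ [(pvLL kc)[r]] := by
  rw [List.take_add_one, List.getElem?_eq_getElem hrN]
  rfl

theorem pvMid_init (kc : List (List String)) (mkN r : Nat)
    (heap : List (Nat × List Nat)) (seen : List (List Nat)) (res : List String)
    (inv : PvInv kc mkN r heap seen res) (hrN : r < (pvLL kc).length)
    (hmem : ((pvLL kc)[r].sum, (pvLL kc)[r]) ∈ heap) :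
    PvMid kc r ((pvLL kc)[r]) 0 (heap.erase ((pvLL kc)[r].sum, (pvLL kc)[r])) seen := by
  set t := (pvLL kc)[r] with ht
  have heapnd : heap.Nodup := inv.hnd.of_map
  have hmerase : ∀ e : Nat × List Nat,
      e ∈ heap.erase (t.sum, t) ↔ e ≠ (t.sum, t) ∧ e ∈ heap :=
    fun e => List.Nodup.mem_erase_iff heapnd
  have htk : (pvLL kc).take (r + 1) = (pvLL kc).take r ++ [t] := pvTake_succ_eq kc r hrN
  have hsub : List.Sublist (heap.erase (t.sum, t)) heap := List.erase_sublist ..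
  refine ⟨inv.hnd.sublist (hsub.map Prod.snd), ?_, ?_, inv.hinit, inv.hclose, ?_⟩
  · intro e he
    obtain ⟨hne, hmem'⟩ := (hmerase e).mp he
    obtain ⟨h1, h2, h3⟩ := inv.hheap e hmem'
    refine ⟨h1, h2, ?_⟩
    rw [htk]
    simp only [List.mem_append, List.mem_singleton]
    rintro (h | h)
    · exact h3 h
    · exact hne (Prod.ext (by rw [h1, h]) h)
  · intro u
    rw [inv.hseen u, htk]
    constructor
    · rintro (h | h)
      · left; simp [h]
      · obtain ⟨e, he, rfl⟩ := List.mem_map.mp h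
        by_cases het : e = (t.sum, t)
        · left; simp [het]
        · right; exact List.mem_map.mpr ⟨e, (hmerase e).mpr ⟨het, he⟩, rfl⟩
    · rintro (h | h)
      · rcases List.mem_append.mp h with h' | h'
        · exact Or.inl h'
        · rw [List.mem_singleton] at h'
          subst h'
          exact Or.inr (List.mem_map.mpr ⟨(t.sum, t), hmem, rfl⟩)
      · obtain ⟨e, he, rfl⟩ := List.mem_map.mp h
        exact Or.inr (List.mem_map.mpr ⟨e, ((hmerase e).mp he).2, rfl⟩)
  · intro pos h
    exact absurd h (Nat.not_lt_zero pos)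

theorem pvMid_step (kc : List (List String)) (r : Nat) (t : List Nat) (k : Nat)
    (st : List (Nat × List Nat) × PySem.Set (List Nat))
    (htLL : t ∈ pvLL kc) (hk : k < t.length)
    (mid : PvMid kc r t k st.1 st.2) :
    PvMid kc r t (k + 1) (pvPush kc t st k).1 (pvPush kc t st k).2 := by
  obtain ⟨heap, seen⟩ := st
  simp only at mid
  unfold pvPush
  by_cases hb : t.getD k 0 + 1 < (kc.getD k []).length
  · rw [if_pos hb]
    dsimp only
    by_cases hs : t.set k (t.getD k 0 + 1) ∈ seen
    · rw [if_pos hs]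
      refine ⟨mid.hnd, mid.hheap, mid.hseen, mid.hinit, mid.hcloseOld, ?_⟩
      intro pos hpk hpl hpb
      rcases Nat.lt_succ_iff_lt_or_eq.mp hpk with h | rfl
      · exact mid.hcloseNew pos h hpl hpb
      · exact hs
    · rw [if_neg hs]
      have htv : pvValid kc t := (pvMem_LL kc t).mp htLL
      have hvnb : pvValid kc (t.set k (t.getD k 0 + 1)) :=
        pvValid_set kc t k _ htv hk hb
      have hnbLL : t.set k (t.getD k 0 + 1) ∈ pvLL kc := (pvMem_LL kc _).mpr hvnb
      have hnbtake : t.set k (t.getD k 0 + 1) ∉ (pvLL kc).take (r + 1) := by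
        intro h
        exact hs ((mid.hseen _).mpr (Or.inl h))
      have hnbheap : t.set k (t.getD k 0 + 1) ∉ heap.map Prod.snd := by
        intro h
        exact hs ((mid.hseen _).mpr (Or.inr h))
      have hadd : ∀ u, u ∈ PySem.Set.add seen (t.set k (t.getD k 0 + 1)) ↔
          u ∈ seen ∨ u = t.set k (t.getD k 0 + 1) := by
        intro u
        rw [PySem.Set.mem_add]
      refine ⟨?_, ?_, ?_, ?_, ?_, ?_⟩
      · simp only [List.map_cons]
        exact List.nodup_cons.mpr ⟨hnbheap, mid.hnd⟩
      · intro e he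
        rcases List.mem_cons.mp he with rfl | he'
        · exact ⟨rfl, hnbLL, hnbtake⟩
        · exact mid.hheap e he'
      · intro u
        rw [hadd u, mid.hseen u]
        simp only [List.map_cons, List.mem_cons]
        tauto
      · exact (hadd _).mpr (Or.inl mid.hinit)
      · intro u hu pos hpos hpb
        exact (hadd _).mpr (Or.inl (mid.hcloseOld u hu pos hpos hpb))
      · intro pos hpk hpl hpb
        rcases Nat.lt_succ_iff_lt_or_eq.mp hpk with h | rfl
        · exact (hadd _).mpr (Or.inl (mid.hcloseNew pos h hpl hpb))
        · exact (hadd _).mpr (Or.inr rfl)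
  · rw [if_neg hb]
    refine ⟨mid.hnd, mid.hheap, mid.hseen, mid.hinit, mid.hcloseOld, ?_⟩
    intro pos hpk hpl hpb
    rcases Nat.lt_succ_iff_lt_or_eq.mp hpk with h | rfl
    · exact mid.hcloseNew pos h hpl hpb
    · exact absurd hpb hb

theorem pvMid_fold (kc : List (List String)) (r : Nat) (t : List Nat)
    (htLL : t ∈ pvLL kc) (heap0 : List (Nat × List Nat)) (seen0 : List (List Nat))
    (mid0 : PvMid kc r t 0 heap0 seen0) :
    ∀ k, k ≤ t.length →
      PvMid kc r t k (((List.range k).foldl (pvPush kc t) (heap0, seen0)).1)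
        (((List.range k).foldl (pvPush kc t) (heap0, seen0)).2) := by
  intro k
  induction k with
  | zero =>
    intro _
    simpa using mid0
  | succ k ih =>
    intro hk
    rw [List.range_succ, List.foldl_append, List.foldl_cons, List.foldl_nil]
    exact pvMid_step kc r t k _ htLL (by omega) (ih (by omega))

theorem pvALoop_eq (kc : List (List String)) (mk : Int) :
    ∀ (fuel r : Nat) (heap : List (Nat × List Nat)) (seen : PySem.Set (List Nat))
      (res : List String),
      PvInv kc mk.toNat r heap seen res → (pvLL kc).length - r < fuel →
      pvALoop kc mk fuel heap seen res = ((pvLL kc).take mk.toNat).map (pvJoinKey kc) := by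
  intro fuel
  induction fuel with
  | zero =>
    intro r heap seen res _ hf
    omega
  | succ fuel ih =>
    intro r heap seen res inv hf
    have hreslen : res.length = r := by
      rw [inv.hres]
      simp only [List.length_map, List.length_take]
      have := inv.hr
      omega
    cases heap with
    | nil =>
      have hrN : r = (pvLL kc).length := by
        by_contra hne
        have hlt : r < (pvLL kc).length := lt_of_le_of_ne inv.hr hne
        obtain ⟨hm, _⟩ := pvHeapMember kc mk.toNat r [] seen res inv hlt
        simp at hm
      have hstop : pvALoop kc mk (fuel + 1) [] seen res = res := rfl
      rw [hstop, inv.hres, hrN, List.take_length,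
        List.take_of_length_le (by have := inv.hrm; omega)]
    | cons x xs =>
      by_cases hcond : (res.length : Int) < mk
      · rw [hreslen] at hcond
        have hrmk : r < mk.toNat := by omega
        have hrN : r < (pvLL kc).length := by
          rcases Nat.lt_or_ge r (pvLL kc).length with h | h
          · exact h
          · exfalso
            obtain ⟨_, h2, h3⟩ := inv.hheap x (by simp)
            have hreq : r = (pvLL kc).length := le_antisymm inv.hr h
            rw [hreq, List.take_length] at h3
            exact h3 h2
        obtain ⟨hmem, hmin⟩ := pvHeapMember kc mk.toNat r (x :: xs) seen res inv hrN
        have hpop : pvHeapMin x xs = ((pvLL kc)[r].sum, (pvLL kc)[r]) :=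
          pvHeapMin_eq xs _ x hmem hmin
        have htv : pvValid kc ((pvLL kc)[r]) :=
          (pvMem_LL kc _).mp (List.getElem_mem hrN)
        have hjoin : pvJoinKey? kc ((pvLL kc)[r]) = some (pvJoinKey kc ((pvLL kc)[r])) :=
          pvJoinKey?_eq kc _ htv
        have hstep : pvALoop kc mk (fuel + 1) (x :: xs) seen res
            = pvALoop kc mk fuel
                (((List.range ((pvLL kc)[r]).length).foldl (pvPush kc ((pvLL kc)[r]))
                  ((x :: xs).erase ((pvLL kc)[r].sum, (pvLL kc)[r]), seen)).1)
                (((List.range ((pvLL kc)[r]).length).foldl (pvPush kc ((pvLL kc)[r]))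
                  ((x :: xs).erase ((pvLL kc)[r].sum, (pvLL kc)[r]), seen)).2)
                (res ++ [pvJoinKey kc ((pvLL kc)[r])]) := by
          simp only [pvALoop]
          rw [if_pos (by rw [hreslen]; exact hcond), hpop]
          dsimp only
          rw [hjoin]
        rw [hstep]
        have hmid0 := pvMid_init kc mk.toNat r (x :: xs) seen res inv hrN hmem
        have hmidN := pvMid_fold kc r ((pvLL kc)[r]) (List.getElem_mem hrN) _ _ hmid0
          ((pvLL kc)[r]).length (Nat.le_refl _)
        have htk : (pvLL kc).take (r + 1) = (pvLL kc).take r ++ [(pvLL kc)[r]] :=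
          pvTake_succ_eq kc r hrN
        refine ih (r + 1) _ _ _ ⟨by omega, by omega, ?_, hmidN.hnd, hmidN.hheap,
          hmidN.hseen, hmidN.hinit, ?_⟩ (by omega)
        · rw [inv.hres, htk, List.map_append, List.map_cons, List.map_nil]
        · intro u hu pos hpos hb
          rw [htk] at hu
          rcases List.mem_append.mp hu with h | h
          · exact hmidN.hcloseOld u h pos hpos hb
          · rw [List.mem_singleton] at h
            subst h
            exact hmidN.hcloseNew pos hpos hpos hb
      · have hstep : pvALoop kc mk (fuel + 1) (x :: xs) seen res = res := by
          simp only [pvALoop]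
          rw [if_neg hcond]
        rw [hreslen] at hcond
        have hrmk : mk.toNat ≤ r := by omega
        have hreq : r = mk.toNat := le_antisymm inv.hrm hrmk
        rw [hstep, inv.hres, hreq]

theorem pvInv_zero (kc : List (List String)) (mkN : Nat) (hrows : ∀ c ∈ kc, c ≠ []) :
    PvInv kc mkN 0 [((kc.map (fun _ => 0)).sum, kc.map (fun _ => 0))]
      (PySem.Set.ofList [kc.map (fun _ => 0)]) [] := by
  have hvinit : pvValid kc (kc.map (fun _ => 0)) := by
    refine ⟨by simp, fun i hi => ?_⟩
    rw [List.getD_eq_getElem _ _ (by simpa using hi), List.getD_eq_getElem _ _ hi]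
    simp only [List.getElem_map]
    exact List.length_pos_iff.mpr (hrows kc[i] (List.getElem_mem hi))
  refine ⟨Nat.zero_le _, Nat.zero_le _, rfl, by simp, ?_, ?_, ?_, ?_⟩
  · intro e he
    rw [List.mem_singleton] at he
    subst he
    exact ⟨rfl, (pvMem_LL kc _).mpr hvinit, by simp⟩
  · intro u
    simp [PySem.Set.mem_ofList]
  · simp [PySem.Set.mem_ofList]
  · intro u hu
    exact absurd hu (by simp)

def pvFF (kc : List (List String)) (s : Nat) : List (List Nat) :=
  (List.range s).flatMap (pvWithSum kc)

theorem pvFF_succ (kc : List (List String)) (s : Nat) :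
    pvFF kc (s + 1) = pvFF kc s ++ pvWithSum kc s := by
  simp [pvFF, List.range_succ]

theorem pvFF_top (kc : List (List String)) : pvFF kc (pvCapN kc + 1) = pvLL kc := rfl

theorem pvFF_prefix (kc : List (List String)) (s : Nat) (h : s ≤ pvCapN kc + 1) :
    ∃ rest, pvLL kc = pvFF kc s ++ rest := by
  obtain ⟨d, hd⟩ : ∃ d, pvCapN kc + 1 = s + d := ⟨pvCapN kc + 1 - s, by omega⟩
  refine ⟨((List.range d).map (fun i => s + i)).flatMap (pvWithSum kc), ?_⟩
  unfold pvLL pvFF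
  rw [hd, List.range_add, List.flatMap_append]

theorem pvBInner_eq (kc : List (List String)) (mk : Int) :
    ∀ (ts : List (List Nat)) (res : List String),
      pvBInner kc mk res ts = res ++ ((ts.take (mk.toNat - res.length)).map (pvJoinKey kc)) := by
  intro ts
  induction ts with
  | nil =>
    intro res
    simp [pvBInner]
  | cons t ts ih =>
    intro res
    have hstep : pvBInner kc mk res (t :: ts)
        = pvBInner kc mk (if (res.length : Int) < mk then res ++ [pvJoinKey kc t] else res)
            ts := rfl
    rw [hstep]
    by_cases h : (res.length : Int) < mk
    · rw [if_pos h, ih]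
      have h' : res.length < mk.toNat := by omega
      obtain ⟨n, hn⟩ : ∃ n, mk.toNat - res.length = n + 1 :=
        ⟨mk.toNat - res.length - 1, by omega⟩
      rw [hn]
      have h2 : mk.toNat - (res ++ [pvJoinKey kc t]).length = n := by
        simp only [List.length_append, List.length_cons, List.length_nil]
        omega
      rw [h2]
      simp [List.take_succ_cons]
    · rw [if_neg h, ih]
      have h' : mk.toNat - res.length = 0 := by omega
      rw [h']
      simp

theorem pvBLoop_eq (kc : List (List String)) (mk : Int) :
    ∀ (k s : Nat) (res : List String), s + k = pvCapN kc + 1 →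
      res = ((pvFF kc s).take mk.toNat).map (pvJoinKey kc) →
      pvBLoop kc mk k s res = ((pvLL kc).take mk.toNat).map (pvJoinKey kc) := by
  intro k
  induction k with
  | zero =>
    intro s res hs hres
    have hseq : s = pvCapN kc + 1 := by omega
    rw [show pvBLoop kc mk 0 s res = res from rfl, hres, hseq, pvFF_top]
  | succ k ih =>
    intro s res hs hres
    have hlen : res.length = min mk.toNat (pvFF kc s).length := by
      rw [hres]; simp
    have hstep : pvBLoop kc mk (k + 1) s res
        = if (res.length : Int) < mk then
            pvBLoop kc mk k (s + 1) (pvBInner kc mk res (pvWithSum kc s))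
          else res := rfl
    rw [hstep]
    by_cases h : (res.length : Int) < mk
    · rw [if_pos h]
      apply ih (s + 1) _ (by omega)
      have h1 : res.length < mk.toNat := by omega
      have h2 : res.length = (pvFF kc s).length := by
        rw [Nat.min_def] at hlen
        split_ifs at hlen <;> omega
      rw [pvBInner_eq, h2, hres, pvFF_succ, List.take_append, List.map_append]
    · rw [if_neg h]
      obtain ⟨rest, hrest⟩ := pvFF_prefix kc s (by omega)
      have h1 : mk.toNat ≤ res.length := by omega
      have h2 : mk.toNat ≤ (pvFF kc s).length := by
        rw [Nat.min_def] at hlen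
        split_ifs at hlen <;> omega
      rw [hres, hrest, List.take_append]
      have h3 : mk.toNat - (pvFF kc s).length = 0 := by omega
      rw [h3]
      simp

theorem pvWithSum_nil_of_empty_row (kc : List (List String)) (i : Nat) (hi : i < kc.length)
    (he : kc[i] = ([] : List String)) (s : Nat) : pvWithSum kc s = [] := by
  rw [List.eq_nil_iff_forall_not_mem]
  intro t ht
  obtain ⟨hv, _⟩ := (pvMem_withSum kc s t).mp ht
  have hb := hv.2 i hi
  rw [List.getD_eq_getElem _ _ hi, he] at hb
  simp at hb

theorem pvBLoop_nil (kc : List (List String)) (mk : Int)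
    (hl : ∀ s, pvWithSum kc s = []) :
    ∀ (k s : Nat), pvBLoop kc mk k s [] = [] := by
  intro k
  induction k with
  | zero => intro s; rfl
  | succ k ih =>
    intro s
    simp only [pvBLoop, hl s]
    split_ifs with h
    · exact ih (s + 1)
    · rfl

theorem pvB_empty_row (kc : List (List String)) (mk : Int) (hkc : kc ≠ []) (i : Nat)
    (hi : i < kc.length) (he : kc[i] = ([] : List String)) :
    generate_key_combinations_py_alt kc mk = [] := by
  unfold generate_key_combinations_py_alt
  rw [if_neg hkc]
  exact pvBLoop_nil kc mk (pvWithSum_nil_of_empty_row kc i hi he) _ _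

theorem pvA_empty_row (kc : List (List String)) (mk : Int) (hkc : kc ≠ []) (i : Nat)
    (hi : i < kc.length) (he : kc[i] = ([] : List String)) :
    generate_key_combinations_py kc mk = [] := by
  unfold generate_key_combinations_py
  rw [if_neg hkc]
  have hprod : (kc.map (fun c => c.length)).prod = 0 := by
    apply List.prod_eq_zero
    exact List.mem_map.mpr ⟨kc[i], List.getElem_mem hi, by rw [he]; rfl⟩
  rw [hprod]
  have hjoin := pvJoinKey?_initial_none kc i hi he
  simp only [pvALoop]
  split_ifs with h
  · simp only [pvHeapMin, List.foldl_nil]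
    rw [hjoin]
  · rfl

theorem pvCap_int (kc : List (List String)) (hrows : ∀ c ∈ kc, c ≠ []) :
    (kc.map (fun c => (c.length : Int) - 1)).sum = (pvCapN kc : Int) := by
  induction kc with
  | nil => simp [pvCapN]
  | cons c rest ih =>
    have hc : c ≠ [] := hrows c (by simp)
    have hlen : 1 ≤ c.length := List.length_pos_iff.mpr hc
    have ih' := ih (fun c' hc' => hrows c' (by simp [hc']))
    simp only [List.map_cons, List.sum_cons, pvCapN] at ih' ⊢
    omega

theorem pvMain (kc : List (List String)) (mk : Int) :
    generate_key_combinations_py kc mk = generate_key_combinations_py_alt kc mk := by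
  by_cases hkc : kc = []
  · subst hkc
    rfl
  · by_cases hrows : ∀ c ∈ kc, c ≠ []
    · have hAv : generate_key_combinations_py kc mk
          = ((pvLL kc).take mk.toNat).map (pvJoinKey kc) := by
        unfold generate_key_combinations_py
        rw [if_neg hkc]
        exact pvALoop_eq kc mk _ 0 _ _ _ (pvInv_zero kc mk.toNat hrows)
          (by have := pvLL_length_le kc; omega)
      have hBv : generate_key_combinations_py_alt kc mk
          = ((pvLL kc).take mk.toNat).map (pvJoinKey kc) := by
        unfold generate_key_combinations_py_alt
        rw [if_neg hkc]
        have hcap : ((kc.map (fun c => (c.length : Int) - 1)).sum + 1).toNat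
            = pvCapN kc + 1 := by
          rw [pvCap_int kc hrows]
          omega
        show pvBLoop kc mk (((kc.map (fun c => (c.length : Int) - 1)).sum + 1).toNat) 0 []
            = ((pvLL kc).take mk.toNat).map (pvJoinKey kc)
        rw [hcap]
        exact pvBLoop_eq kc mk (pvCapN kc + 1) 0 [] (by omega) (by simp [pvFF])
      rw [hAv, hBv]
    · push Not at hrows
      obtain ⟨c, hc, hce⟩ := hrows
      obtain ⟨i, hi, hie⟩ := List.mem_iff_getElem.mp hc
      rw [pvA_empty_row kc mk hkc i hi (by rw [hie, hce]),
        pvB_empty_row kc mk hkc i hi (by rw [hie, hce])]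

-- ===== VERDICT (by name: the statement is the Claim_ definition above) =====
theorem generate_key_combinations_py_spec : Claim_equal_generate_key_combinations_py := by
  unfold Claim_equal_generate_key_combinations_py
  intro kc mk _
  unfold Spec_generate_key_combinations_py
  exact pvMain kc mk
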